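-- pv_equiv track=rewrite | github.com/BSVino/docs.gl | opengl.py | reverse_version_index
-- ===== SOURCE A (Python) =====
-- def reverse_version_index(command_list):
--   reversed = {}
--
--   for version in command_list:
--     for command in command_list[version]:
--       if not command in reversed:
--         reversed[command] = []
--
--       reversed[command].append(version)
--       reversed[command].sort()
--
--   return reversed
-- ===== SOURCE B (Python) =====
-- def reverse_version_index(command_list):
--   pairs = [(command, version) for version in command_list for command in command_list[version]]
--   result = {command: [] for command, _ in pairs}
--   for command, version in sorted(pairs, key=lambda p: p[1]):
--     result[command].append(version)
--   return result
-- ===== Notes on version B (the rewrite author's own statement) =====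
-- stated objective: faster
-- what changed: A inverts with nested loops that re-sort a command's version list after every single append; B flattens the index into one (command, version) pair list, pre-registers keys in one comprehension, performs ONE global sort of the pairs by version, and then distributes with plain appends (no per-list sort at all).
import Mathlib
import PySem

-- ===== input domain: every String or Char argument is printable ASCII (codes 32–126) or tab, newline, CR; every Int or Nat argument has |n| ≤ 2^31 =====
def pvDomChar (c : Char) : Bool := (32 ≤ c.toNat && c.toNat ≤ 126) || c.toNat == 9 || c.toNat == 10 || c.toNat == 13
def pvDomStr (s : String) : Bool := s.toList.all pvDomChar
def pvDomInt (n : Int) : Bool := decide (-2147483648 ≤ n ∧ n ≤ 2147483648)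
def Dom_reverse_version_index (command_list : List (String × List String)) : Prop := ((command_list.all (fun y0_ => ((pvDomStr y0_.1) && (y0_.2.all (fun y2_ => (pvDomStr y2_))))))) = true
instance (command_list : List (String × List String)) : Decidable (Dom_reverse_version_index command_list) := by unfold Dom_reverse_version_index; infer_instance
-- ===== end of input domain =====

-- B flattens the index into (command, version) pairs, sorts that pair list ONCE
-- by version and distributes with plain appends, instead of A's nested loops that
-- re-sort a value list after every append (objective: faster).

-- ===== PORT A =====
-- `reversed[command].append(version); reversed[command].sort()` mutates the entry
-- in place: the entry becomes sorted(old ++ [version]); insert keeps the position.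
def reverse_version_index (command_list : List (String × List String)) : List (String × List String) :=
  (command_list.foldl (fun rev p =>
      (((command_list.lookup p.1).getD []).foldl (fun rev command =>
        let rev := if rev.contains command then rev else rev.insert command []
        rev.insert command (PySem.List.sorted (rev.getD command [] ++ [p.1]) (fun x => x) false)) rev))
    PySem.Dict.empty).items

-- ===== PORT B =====
-- pairs = the flattened (command, version) comprehension; `{command: [] for …}`
-- re-inserts [] (overwrite keeps position = first-occurrence key order); then one
-- global sort of pairs by version and a plain append pass (`result[command]` always
-- hits an existing key, ported as modify).
def reverse_version_index_alt (command_list : List (String × List String)) : List (String × List String) :=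
  let pairs := command_list.flatMap (fun p =>
    ((command_list.lookup p.1).getD []).map (fun command => (command, p.1)))
  let result := pairs.foldl (fun d q => d.insert q.1 ([] : List String)) PySem.Dict.empty
  ((PySem.List.sorted pairs (fun q => q.2) false).foldl
      (fun d q => d.modify q.1 [] (fun l => l ++ [q.2])) result).items

-- ===== PRECONDITION & SPEC =====
def Spec_reverse_version_index (command_list : List (String × List String)) (out : List (String × List String)) : Prop := out = reverse_version_index_alt command_list
instance (command_list : List (String × List String)) (out : List (String × List String)) : Decidable (Spec_reverse_version_index command_list out) := by unfold Spec_reverse_version_index; infer_instance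

-- ===== CLAIM (what is proved, stated in full; the proofs are below) =====
def Claim_equal_reverse_version_index : Prop := ∀ (command_list : List (String × List String)), Dom_reverse_version_index command_list → Spec_reverse_version_index command_list (reverse_version_index command_list)

-- ===== LEMMAS AND PROOFS =====

-- The flattened pair stream both programs process.
def pvPairs (command_list : List (String × List String)) : List (String × String) :=
  command_list.flatMap (fun p =>
    ((command_list.lookup p.1).getD []).map (fun command => (command, p.1)))

-- A's per-pair step and the plain append step.
def pvStepA (rev : PySem.Dict String (List String)) (q : String × String) :
    PySem.Dict String (List String) :=
  let rev := if rev.contains q.1 then rev else rev.insert q.1 []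
  rev.insert q.1 (PySem.List.sorted (rev.getD q.1 [] ++ [q.2]) (fun x => x) false)

def pvStepApp (rev : PySem.Dict String (List String)) (q : String × String) :
    PySem.Dict String (List String) :=
  rev.modify q.1 [] (fun l => l ++ [q.2])

-- Invariant: A's dict vs the append-only dict over the same pair stream.
def pvInv (dA dB : PySem.Dict String (List String)) : Prop :=
  dA.keys = dB.keys ∧ dB.keys.Nodup ∧
    ∀ k, dA.getD k [] = PySem.List.sorted (dB.getD k []) (fun x => x) false

theorem pvInv_step (dA dB : PySem.Dict String (List String)) (q : String × String)
    (h : pvInv dA dB) : pvInv (pvStepA dA q) (pvStepApp dB q) := by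
  obtain ⟨hk, hnd, hget⟩ := h
  obtain ⟨c, v⟩ := q
  have hc : dA.contains c = dB.contains c := by
    rw [PySem.Dict.contains_eq_decide_mem_keys, PySem.Dict.contains_eq_decide_mem_keys, hk]
  unfold pvStepA pvStepApp
  refine ⟨?_, ?_, ?_⟩
  · -- keys
    rw [PySem.Dict.keys_modify]
    by_cases hb : dB.contains c = true
    · have ha : dA.contains c = true := by rw [hc]; exact hb
      simp only [ha, if_true]
      rw [PySem.Dict.keys_insert_of_contains dA _ ha,
        PySem.Dict.keys_insert_of_contains dB _ hb, hk]
    · have hb' : dB.contains c = false := by simpa using hb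
      have ha' : dA.contains c = false := by rw [hc]; exact hb'
      simp only [ha', Bool.false_eq_true, if_false]
      rw [PySem.Dict.keys_insert_of_contains _ _ (PySem.Dict.contains_insert_self dA c []),
        PySem.Dict.keys_insert_of_not_contains dA _ ha',
        PySem.Dict.keys_insert_of_not_contains dB _ hb', hk]
  · -- nodup
    rw [PySem.Dict.keys_modify]
    by_cases hb : dB.contains c = true
    · rw [PySem.Dict.keys_insert_of_contains dB _ hb]; exact hnd
    · have hb' : dB.contains c = false := by simpa using hb
      rw [PySem.Dict.keys_insert_of_not_contains dB _ hb']
      refine List.nodup_append.mpr ⟨hnd, List.nodup_singleton _, ?_⟩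
      intro x hx y hy
      simp only [List.mem_singleton] at hy
      subst hy
      intro hxy; subst hxy
      exact absurd ((PySem.Dict.contains_iff_mem_keys _ _).mpr hx) (by simp [hb'])
  · -- getD
    intro k
    have hAc : (if dA.contains c then dA else dA.insert c []).getD c [] = dA.getD c [] := by
      by_cases ha : dA.contains c = true
      · simp only [ha, if_true]
      · have ha' : dA.contains c = false := by simpa using ha
        simp only [ha', Bool.false_eq_true, if_false]
        rw [PySem.Dict.getD_insert_self, PySem.Dict.getD_of_not_contains dA _ ha']
    by_cases hkc : k = c
    · subst hkc
      rw [PySem.Dict.getD_insert_self, PySem.Dict.getD_modify_self, hAc, hget]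
      exact PySem.List.sorted_eq_sorted_of_perm _ _ _ (fun a b hab => hab)
        ((PySem.List.sorted_perm _ _ _).append_right [v])
    · rw [PySem.Dict.getD_insert_of_ne _ _ _ hkc, PySem.Dict.getD_modify_of_ne _ _ _ hkc]
      by_cases ha : dA.contains c = true
      · simp only [ha, if_true]; exact hget k
      · have ha' : dA.contains c = false := by simpa using ha
        simp only [ha', Bool.false_eq_true, if_false]
        rw [PySem.Dict.getD_insert_of_ne _ _ _ hkc]; exact hget k

theorem pvInv_fold (P : List (String × String)) (dA dB : PySem.Dict String (List String))
    (h : pvInv dA dB) : pvInv (P.foldl pvStepA dA) (P.foldl pvStepApp dB) := by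
  induction P generalizing dA dB with
  | nil => exact h
  | cons q qs ih => exact ih _ _ (pvInv_step dA dB q h)

-- A's nested loops ARE the fold of pvStepA over the flattened pair stream.
theorem pvA_flat (command_list : List (String × List String)) :
    reverse_version_index command_list = ((pvPairs command_list).foldl pvStepA PySem.Dict.empty).items := by
  unfold reverse_version_index pvPairs
  rw [List.foldl_flatMap]
  simp only [List.foldl_map]
  rfl

-- The first B pass only inserts []: every lookup with default [] yields [].
theorem pvGetD_insert_nil (P : List (String × String)) (d : PySem.Dict String (List String))
    (k : String) (h : d.getD k [] = []) :
    (P.foldl (fun d q => d.insert q.1 ([] : List String)) d).getD k [] = [] := by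
  induction P generalizing d with
  | nil => exact h
  | cons q qs ih =>
    refine ih _ ?_
    rw [PySem.Dict.getD_insert]
    split_ifs <;> simp [h]

-- Sorting the flat pair list by version, then filtering one command and taking the
-- versions, is sorting that command's version list.
theorem pvSortFilter (P : List (String × String)) (k : String) :
    PySem.List.sorted ((P.filter (fun p => p.1 == k)).map (fun p => p.2)) (fun x => x) false
      = ((PySem.List.sorted P (fun q => q.2) false).filter (fun p => p.1 == k)).map (fun p => p.2) := by
  apply PySem.List.sorted_id_eq_of_perm_of_pairwise
  · exact (((PySem.List.sorted_perm P (fun q => q.2) false).filter _).map _)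
  · exact List.pairwise_map.mpr
      ((PySem.List.sorted_pairwise P (fun q => q.2)).sublist List.filter_sublist)

-- ===== VERDICT (by name: the statement is the Claim_ definition above) =====
theorem reverse_version_index_spec : Claim_equal_reverse_version_index := by
  intro command_list _
  unfold Spec_reverse_version_index
  rw [pvA_flat]
  set P := pvPairs command_list with hP
  have hinv := pvInv_fold P PySem.Dict.empty PySem.Dict.empty ⟨rfl, List.nodup_nil, fun k => rfl⟩
  obtain ⟨hk, hnd, hget⟩ := hinv
  set dA := P.foldl pvStepA PySem.Dict.empty
  set dApp := P.foldl pvStepApp PySem.Dict.empty with hdApp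
  set dB0 := P.foldl (fun d q => d.insert q.1 ([] : List String)) PySem.Dict.empty with hdB0
  set dB := (PySem.List.sorted P (fun q => q.2) false).foldl
      (fun d q => d.modify q.1 [] (fun l => l ++ [q.2])) dB0 with hdB
  -- keys of all four dicts
  have hkApp : dApp.keys = PySem.Set.update [] (P.map (fun q => q.1)) := by
    rw [hdApp]
    exact PySem.Dict.keys_foldl_modify_key P (fun q => q.1) [] (fun d q => fun l => l ++ [q.2])
      PySem.Dict.empty
  have hkB0 : dB0.keys = PySem.Set.update [] (P.map (fun q => q.1)) := by
    rw [hdB0]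
    exact PySem.Dict.keys_foldl_insert_key P (fun q => q.1) (fun d q => ([] : List String))
      PySem.Dict.empty
  have hkB : dB.keys = dB0.keys := by
    rw [hdB]
    rw [PySem.Dict.keys_foldl_modify_key (PySem.List.sorted P (fun q => q.2) false)
      (fun (q : String × String) => q.1) ([] : List String)
      (fun d (q : String × String) => fun l => l ++ [q.2]) dB0]
    rw [PySem.Set.update_eq_append_filter]
    have : ((PySem.Set.ofList ((PySem.List.sorted P (fun q => q.2) false).map (fun q => q.1))).filter
        (fun y => !(PySem.Set.contains dB0.keys y))) = [] := by
      refine List.filter_eq_nil_iff.mpr (fun x hx => ?_)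
      have hx' : x ∈ P.map (fun q => q.1) := by
        exact ((PySem.List.sorted_perm P (fun q => q.2) false).map (fun q => q.1)).mem_iff.mp
          ((PySem.Set.mem_ofList _ _).mp hx)
      have : x ∈ dB0.keys := by
        rw [hkB0]
        exact (PySem.Set.mem_update _ _ _).mpr (Or.inr hx')
      simp [this]
    rw [this, List.append_nil]
  have hkeys : dA.keys = dB.keys := by rw [hk, hkApp, hkB, hkB0]
  have hndB : dB.keys.Nodup := by rw [hkB, hkB0, ← hkApp, ← hk]; rw [hk]; exact hnd
  -- values agree at every key
  have hval : ∀ k, dA.getD k [] = dB.getD k [] := by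
    intro k
    have hApp : dApp.getD k [] = (P.filter (fun p => p.1 == k)).map (fun p => p.2) := by
      rw [hdApp]
      have := PySem.Dict.getD_foldl_modify_append P PySem.Dict.empty k
      simpa using this
    have hB : dB.getD k [] = ((PySem.List.sorted P (fun q => q.2) false).filter
        (fun p => p.1 == k)).map (fun p => p.2) := by
      rw [hdB]
      have := PySem.Dict.getD_foldl_modify_append (PySem.List.sorted P (fun q => q.2) false) dB0 k
      rw [this, pvGetD_insert_nil P PySem.Dict.empty k rfl, List.nil_append]
    rw [hget k, hApp, hB, pvSortFilter]
  -- items agree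
  show dA.items = dB.items
  rw [PySem.Dict.items_eq_map_keys dA (by rw [hkeys]; exact hndB) [],
    PySem.Dict.items_eq_map_keys dB hndB [], hkeys]
  exact List.map_congr_left (fun k _ => by rw [hval k])
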